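-- pv_equiv track=rewrite | github.com/TPO-Code/PyTPO | src/ui/completion_manager.py | _symbol_at_source_position
-- ===== SOURCE A (Python) =====
-- def _symbol_at_source_position(source_text: str, line: int, column: int) -> str:
--     lines = (source_text or "").splitlines()
--     if not (1 <= line <= len(lines)):
--         return ""
--     text = lines[line - 1]
--     if not text:
--         return ""
--     col = max(0, min(int(column), len(text)))
--     if col >= len(text) and col > 0:
--         col -= 1
--     if col < 0 or col >= len(text):
--         return ""
--     if not (text[col].isalnum() or text[col] == "_"):
--         if col > 0 and (text[col - 1].isalnum() or text[col - 1] == "_"):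
--             col -= 1
--         else:
--             return ""
--     start = col
--     while start > 0 and (text[start - 1].isalnum() or text[start - 1] == "_"):
--         start -= 1
--     end = col + 1
--     while end < len(text) and (text[end].isalnum() or text[end] == "_"):
--         end += 1
--     return str(text[start:end]).strip()
-- ===== SOURCE B (Python) =====
-- def _symbol_at_source_position(source_text: str, line: int, column: int) -> str:
--     lines = (source_text or "").splitlines()
--     if not (1 <= line <= len(lines)):
--         return ""
--     text = lines[line - 1]
--     if not text:
--         return ""
--     # clamp the cursor onto the last valid index in one step
--     c = min(max(int(column), 0), len(text) - 1)
--     # single pass with a sentinel: flush each maximal word run (s, i) and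
--     # return it as soon as the run touches the cursor (s <= c <= i)
--     s = None
--     for i, ch in enumerate(text + " "):
--         if ch.isalnum() or ch == "_":
--             if s is None:
--                 s = i
--         else:
--             if s is not None and s <= c <= i:
--                 return text[s:i]
--             s = None
--     return ""
-- ===== Notes on version B (the rewrite author's own statement) =====
-- stated objective: alternative
-- what changed: A's four-step column normalization collapses to a single clamp onto [0, len-1], and the branchy anchor-shift plus two outward while-loops are replaced by one sentinel-terminated forward pass that flushes each maximal word-character run and returns the first run touching the cursor (s <= c <= end), with no strip needed.
import Mathlib
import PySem

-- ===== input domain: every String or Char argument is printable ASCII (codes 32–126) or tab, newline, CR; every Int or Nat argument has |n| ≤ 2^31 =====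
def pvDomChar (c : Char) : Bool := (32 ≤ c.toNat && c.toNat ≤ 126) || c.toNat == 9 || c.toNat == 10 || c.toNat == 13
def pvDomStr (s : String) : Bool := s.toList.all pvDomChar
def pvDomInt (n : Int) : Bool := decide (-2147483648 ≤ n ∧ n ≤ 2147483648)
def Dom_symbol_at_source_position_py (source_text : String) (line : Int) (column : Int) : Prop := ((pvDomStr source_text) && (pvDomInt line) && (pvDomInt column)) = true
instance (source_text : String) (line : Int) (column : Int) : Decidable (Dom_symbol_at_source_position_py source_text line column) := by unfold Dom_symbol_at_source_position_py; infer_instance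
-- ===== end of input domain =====

-- B collapses A's four-step column normalization to one clamp onto [0, len-1] and replaces
-- the anchor-shift branches plus the two outward while-loops by a single sentinel-terminated
-- forward pass returning the first maximal word run that touches the cursor; objective:
-- alternative, same cost.

-- ===== PORT A =====
def pvIsWord (c : Char) : Bool := PySem.Chars.isalnum c || c == '_'

-- while start > 0 and word(text[start-1]): start -= 1
def pvLeftA (cs : List Char) : Nat → Nat
  | 0 => 0
  | s + 1 => if pvIsWord (cs.getD s ' ') then pvLeftA cs s else s + 1

-- while end < len(text) and word(text[end]): end += 1
def pvRightA (cs : List Char) (e : Nat) : Nat :=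
  if h : e < cs.length ∧ pvIsWord (cs.getD e ' ') then pvRightA cs (e + 1) else e
termination_by cs.length - e
decreasing_by omega

-- start = …; end = …; return str(text[start:end]).strip()
def pvFinishA (cs : List Char) (c : Nat) : String :=
  String.ofList (PySem.Chars.strip (PySem.List.slice cs (some ((pvLeftA cs c : Nat) : Int)) (some ((pvRightA cs (c + 1) : Nat) : Int))))

def symbol_at_source_position_py (source_text : String) (line : Int) (column : Int) : String :=
  let src := if source_text == "" then "" else source_text
  let lines := PySem.Str.splitlines src
  if ¬ (1 ≤ line ∧ line ≤ (lines.length : Int)) then "" else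
  let text := (PySem.List.pyGet? lines (line - 1)).getD ""   -- guarded: index is in range
  if text == "" then "" else
  let cs := text.toList
  let n : Int := (cs.length : Int)
  let col0 : Int := max 0 (min column n)
  let col1 : Int := if col0 ≥ n ∧ col0 > 0 then col0 - 1 else col0
  if col1 < 0 ∨ col1 ≥ n then "" else
  let c := col1.toNat
  if ¬ pvIsWord (cs.getD c ' ') then
    if c > 0 ∧ pvIsWord (cs.getD (c - 1) ' ') then pvFinishA cs (c - 1) else ""
  else pvFinishA cs c

-- ===== PORT B =====
-- the single pass of Source B over text + " " (sentinel): flush each maximal word run (s, i)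
-- and return it as soon as it touches the cursor (s <= c <= i)
def pvLoopB (csS cs : List Char) (c : Nat) (i : Nat) (st : Option Nat) : String :=
  if _h : i < csS.length then
    if pvIsWord (csS.getD i ' ') then pvLoopB csS cs c (i + 1) (some (st.getD i))
    else
      match st with
      | some s =>
        if s ≤ c ∧ c ≤ i then String.ofList (PySem.List.slice cs (some (s : Int)) (some (i : Int)))
        else pvLoopB csS cs c (i + 1) none
      | none => pvLoopB csS cs c (i + 1) none
  else ""
termination_by csS.length - i
decreasing_by all_goals omega

def symbol_at_source_position_py_alt (source_text : String) (line : Int) (column : Int) : String :=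
  let src := if source_text == "" then "" else source_text
  let lines := PySem.Str.splitlines src
  if ¬ (1 ≤ line ∧ line ≤ (lines.length : Int)) then "" else
  let text := (PySem.List.pyGet? lines (line - 1)).getD ""   -- guarded: index is in range
  if text == "" then "" else
  let cs := text.toList
  -- c = min(max(int(column), 0), len(text) - 1)
  let c : Nat := (min (max column 0) ((cs.length : Int) - 1)).toNat
  pvLoopB (cs ++ [' ']) cs c 0 none

-- ===== PRECONDITION & SPEC =====
def Spec_symbol_at_source_position_py (source_text : String) (line : Int) (column : Int) (out : String) : Prop := out = symbol_at_source_position_py_alt source_text line column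
instance (source_text : String) (line : Int) (column : Int) (out : String) : Decidable (Spec_symbol_at_source_position_py source_text line column out) := by unfold Spec_symbol_at_source_position_py; infer_instance

-- ===== CLAIM (what is proved, stated in full; the proofs are below) =====
def Claim_equal_symbol_at_source_position_py : Prop := ∀ (source_text : String) (line : Int) (column : Int), Dom_symbol_at_source_position_py source_text line column → Spec_symbol_at_source_position_py source_text line column (symbol_at_source_position_py source_text line column)

-- ===== LEMMAS AND PROOFS =====

lemma pvWord_not_space (c : Char) (h : pvIsWord c = true) : PySem.Chars.isspace c = false := by
  have hb : (48 ≤ c.toNat ∧ c.toNat ≤ 57) ∨ (65 ≤ c.toNat ∧ c.toNat ≤ 90) ∨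
      (97 ≤ c.toNat ∧ c.toNat ≤ 122) ∨ c.toNat = 95 := by
    simp only [pvIsWord, PySem.Chars.isalnum, PySem.Chars.isalpha, PySem.Chars.isdigit,
      PySem.Chars.isupper, PySem.Chars.islower, Bool.or_eq_true, Bool.and_eq_true,
      decide_eq_true_eq, beq_iff_eq, Char.le_def, UInt32.le_iff_toNat_le] at h
    rcases h with ((⟨h1, h2⟩ | ⟨h1, h2⟩) | ⟨h1, h2⟩) | h1
    · exact Or.inr (Or.inl ⟨h1, h2⟩)
    · exact Or.inr (Or.inr (Or.inl ⟨h1, h2⟩))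
    · exact Or.inl ⟨h1, h2⟩
    · subst h1; exact Or.inr (Or.inr (Or.inr rfl))
  simp only [PySem.Chars.isspace, Bool.or_eq_false_iff, Bool.and_eq_false_iff,
    decide_eq_false_iff_not]
  omega

lemma pvDropWhile_eq_self (p : Char → Bool) (l : List Char) (h : ∀ c ∈ l, p c = false) :
    l.dropWhile p = l := by
  cases l with
  | nil => rfl
  | cons a t => simp [h a (by simp)]

lemma pvStrip_noop (l : List Char) (h : ∀ c ∈ l, PySem.Chars.isspace c = false) :
    PySem.Chars.strip l = l := by
  unfold PySem.Chars.strip PySem.Chars.lstrip PySem.Chars.rstrip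
  rw [pvDropWhile_eq_self _ _ h, pvDropWhile_eq_self, List.reverse_reverse]
  intro c hc; exact h c (by simpa using hc)

-- characterization of A's left while-loop
lemma pvLeftA_spec (cs : List Char) (t : Nat) :
    ∀ s, t ≤ s → (∀ j, t ≤ j → j < s → pvIsWord (cs.getD j ' ') = true) →
    (t = 0 ∨ pvIsWord (cs.getD (t - 1) ' ') = false) → pvLeftA cs s = t := by
  intro s
  induction s with
  | zero =>
    intro hts _ _
    have : t = 0 := by omega
    subst this; rfl
  | succ s ih =>
    intro hts hw hmax
    by_cases he : t = s + 1
    · subst he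
      have : pvIsWord (cs.getD s ' ') = false := by
        rcases hmax with h0 | h0
        · omega
        · simpa using h0
      rw [pvLeftA, this]; simp
    · have hts' : t ≤ s := by omega
      have : pvIsWord (cs.getD s ' ') = true := hw s hts' (by omega)
      rw [pvLeftA, if_pos this]
      exact ih hts' (fun j hj1 hj2 => hw j hj1 (by omega)) hmax

-- characterization of A's right while-loop
lemma pvRightA_spec (cs : List Char) (u : Nat) (hun : u ≤ cs.length)
    (hmax : u = cs.length ∨ pvIsWord (cs.getD u ' ') = false) :
    ∀ k e, u - e ≤ k → e ≤ u → (∀ j, e ≤ j → j < u → pvIsWord (cs.getD j ' ') = true) →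
    pvRightA cs e = u := by
  intro k
  induction k with
  | zero =>
    intro e hk he hw
    have : e = u := by omega
    subst this
    rw [pvRightA, dif_neg]
    rintro ⟨h1, h2⟩
    rcases hmax with h0 | h0
    · omega
    · rw [h0] at h2; exact Bool.false_ne_true h2
  | succ k ih =>
    intro e hk he hw
    by_cases he' : e = u
    · subst he'
      rw [pvRightA, dif_neg]
      rintro ⟨h1, h2⟩
      rcases hmax with h0 | h0
      · omega
      · rw [h0] at h2; exact Bool.false_ne_true h2
    · have h1 : e < u := by omega
      have h2 : pvIsWord (cs.getD e ' ') = true := hw e le_rfl h1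
      rw [pvRightA, dif_pos ⟨by omega, h2⟩]
      exact ih (e + 1) (by omega) (by omega) (fun j hj1 hj2 => hw j (by omega) hj2)

-- proof-side span collector: the maximal word runs of cs from position i with open run st
def pvSpansB (cs : List Char) (i : Nat) (st : Option Nat) : List (Nat × Nat) :=
  if _h : i < cs.length then
    if pvIsWord (cs.getD i ' ') then pvSpansB cs (i + 1) (some (st.getD i))
    else match st with
      | none => pvSpansB cs (i + 1) none
      | some s => (s, i) :: pvSpansB cs (i + 1) none
  else match st with | none => [] | some s => [(s, cs.length)]
termination_by cs.length - i
decreasing_by all_goals omega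

-- invariant carried by the span-collecting pass
def pvInv (cs : List Char) (i : Nat) : Option Nat → Prop
  | none => i = 0 ∨ pvIsWord (cs.getD (i - 1) ' ') = false
  | some s => s < i ∧ (∀ j, s ≤ j → j < i → pvIsWord (cs.getD j ' ') = true) ∧
      (s = 0 ∨ pvIsWord (cs.getD (s - 1) ' ') = false)

def pvGood (cs : List Char) (p : Nat × Nat) : Prop :=
  p.1 < p.2 ∧ p.2 ≤ cs.length ∧ (∀ j, p.1 ≤ j → j < p.2 → pvIsWord (cs.getD j ' ') = true) ∧
  (p.1 = 0 ∨ pvIsWord (cs.getD (p.1 - 1) ' ') = false) ∧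
  (p.2 = cs.length ∨ pvIsWord (cs.getD p.2 ' ') = false)

lemma pvSpansB_sound (cs : List Char) :
    ∀ k i st, cs.length - i ≤ k → i ≤ cs.length → pvInv cs i st →
    ∀ p ∈ pvSpansB cs i st, pvGood cs p := by
  intro k
  induction k with
  | zero =>
    intro i st hk hi hinv p hp
    have hni : ¬ i < cs.length := by omega
    rw [pvSpansB.eq_def, dif_neg hni] at hp
    cases st with
    | none => simp at hp
    | some s =>
      simp only [List.mem_singleton] at hp
      subst hp
      obtain ⟨h1, h2, h3⟩ := hinv
      exact ⟨by omega, le_rfl, fun j hj1 hj2 => h2 j hj1 (by omega), h3, Or.inl rfl⟩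
  | succ k ih =>
    intro i st hk hi hinv p hp
    by_cases hil : i < cs.length
    · rw [pvSpansB.eq_def, dif_pos hil] at hp
      by_cases hw : pvIsWord (cs.getD i ' ') = true
      · rw [if_pos hw] at hp
        cases st with
        | none =>
          refine ih (i + 1) (some i) (by omega) (by omega) ?_ p (by simpa using hp)
          refine ⟨by omega, ?_, hinv⟩
          intro j hj1 hj2
          have hji : j = i := by omega
          subst hji
          exact hw
        | some s =>
          obtain ⟨h1, h2, h3⟩ := hinv
          refine ih (i + 1) (some s) (by omega) (by omega) ?_ p (by simpa using hp)
          refine ⟨by omega, fun j hj1 hj2 => ?_, h3⟩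
          by_cases hji : j = i
          · rw [hji]; exact hw
          · exact h2 j hj1 (by omega)
      · rw [if_neg hw] at hp
        have hwf : pvIsWord (cs.getD i ' ') = false := by
          cases h : pvIsWord (cs.getD i ' ') <;> simp_all
        cases st with
        | none =>
          exact ih (i + 1) none (by omega) (by omega) (Or.inr (by simpa using hwf)) p hp
        | some s =>
          obtain ⟨h1, h2, h3⟩ := hinv
          rcases List.mem_cons.mp hp with hpe | hpr
          · subst hpe
            exact ⟨h1, by omega, fun j hj1 hj2 => h2 j hj1 hj2, h3, Or.inr hwf⟩
          · exact ih (i + 1) none (by omega) (by omega) (Or.inr (by simpa using hwf)) p hpr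
    · rw [pvSpansB.eq_def, dif_neg hil] at hp
      cases st with
      | none => simp at hp
      | some s =>
        simp only [List.mem_singleton] at hp
        subst hp
        obtain ⟨h1, h2, h3⟩ := hinv
        have hieq : i = cs.length := by omega
        exact ⟨by omega, le_rfl, fun j hj1 hj2 => h2 j hj1 (by omega), h3, Or.inl rfl⟩

lemma pvSpansB_cover (cs : List Char) (c : Nat) (hc : c < cs.length)
    (hw : pvIsWord (cs.getD c ' ') = true) :
    ∀ k i st, cs.length - i ≤ k → pvInv cs i st →
    (i ≤ c ∨ ∃ s, st = some s ∧ s ≤ c) →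
    ∃ p ∈ pvSpansB cs i st, p.1 ≤ c ∧ c < p.2 := by
  intro k
  induction k with
  | zero =>
    intro i st hk _ hcov
    have hni : ¬ i < cs.length := by omega
    rw [pvSpansB.eq_def, dif_neg hni]
    rcases hcov with hic | ⟨s, hst, hsc⟩
    · omega
    · subst hst
      exact ⟨(s, cs.length), by simp, hsc, hc⟩
  | succ k ih =>
    intro i st hk hinv hcov
    by_cases hil : i < cs.length
    · rw [pvSpansB.eq_def, dif_pos hil]
      by_cases hwi : pvIsWord (cs.getD i ' ') = true
      · rw [if_pos hwi]
        cases st with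
        | none =>
          simp only [Option.getD_none]
          refine ih (i + 1) (some i) (by omega) ?_ ?_
          · refine ⟨by omega, ?_, hinv⟩
            intro j hj1 hj2
            have hji : j = i := by omega
            subst hji
            exact hwi
          · rcases hcov with hic | ⟨s, hst, _⟩
            · exact Or.inr ⟨i, rfl, hic⟩
            · exact absurd hst (by simp)
        | some s =>
          obtain ⟨h1, h2, h3⟩ := hinv
          simp only [Option.getD_some]
          refine ih (i + 1) (some s) ?_ ?_ ?_
          · clear hcov; omega
          · refine ⟨by omega, ?_, h3⟩
            intro j hj1 hj2
            by_cases hji : j = i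
            · rw [hji]; exact hwi
            · exact h2 j hj1 (by omega)
          · rcases hcov with hic | ⟨s', hst, hsc⟩
            · exact Or.inr ⟨s, rfl, by omega⟩
            · obtain rfl : s = s' := Option.some.inj hst
              exact Or.inr ⟨s, rfl, hsc⟩
      · rw [if_neg hwi]
        have hic : i ≠ c := fun h => hwi (h ▸ hw)
        have hwf : pvIsWord (cs.getD i ' ') = false := by
          cases h : pvIsWord (cs.getD i ' ') <;> simp_all
        cases st with
        | none =>
          refine ih (i + 1) none (by omega) (Or.inr (by simpa using hwf)) ?_
          rcases hcov with h | ⟨s, hst, _⟩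
          · exact Or.inl (by omega)
          · exact absurd hst (by simp)
        | some s =>
          obtain ⟨h1, h2, h3⟩ := hinv
          by_cases hci : c < i
          · rcases hcov with h | ⟨s', hst, hsc⟩
            · omega
            · obtain rfl : s = s' := Option.some.inj hst
              exact ⟨(s, i), List.mem_cons_self, hsc, hci⟩
          · have hic' : i < c := by clear hcov; omega
            obtain ⟨p, hpm, hp⟩ :=
              ih (i + 1) none (by clear hcov; omega) (Or.inr (by simpa using hwf)) (Or.inl (by clear hcov; omega))
            exact ⟨p, List.mem_cons_of_mem _ hpm, hp⟩
    · rw [pvSpansB.eq_def, dif_neg hil]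
      rcases hcov with hic | ⟨s, hst, hsc⟩
      · omega
      · subst hst
        exact ⟨(s, cs.length), by simp, hsc, hc⟩

-- the sentinel list cs ++ [' '] and cs agree under getD with default ' '
lemma pvGetD_append_space (cs : List Char) (i : Nat) :
    (cs ++ [' ']).getD i ' ' = cs.getD i ' ' := by
  induction cs generalizing i with
  | nil => cases i <;> simp [List.getD]
  | cons a t ih =>
    cases i with
    | zero => simp [List.getD]
    | succ n => simpa [List.getD] using ih n

-- value of B's loop at the last position (i = cs.length, flushing on the sentinel)
lemma pvLoopB_last (cs : List Char) (c : Nat) (st : Option Nat) :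
    pvLoopB (cs ++ [' ']) cs c cs.length st =
      match List.find? (fun p => p.1 ≤ c && c ≤ p.2) (pvSpansB cs cs.length st) with
      | some p => String.ofList (PySem.List.slice cs (some (p.1 : Int)) (some (p.2 : Int)))
      | none => "" := by
  have hlen : (cs ++ [' ']).length = cs.length + 1 := by simp
  rw [pvLoopB.eq_def, dif_pos (by omega),
    if_neg (by rw [pvGetD_append_space, List.getD_eq_default _ _ le_rfl]; decide)]
  rw [pvSpansB.eq_def, dif_neg (lt_irrefl _)]
  cases st with
  | none =>
    dsimp only
    rw [pvLoopB.eq_def, dif_neg (by omega)]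
    simp
  | some s =>
    dsimp only
    by_cases h : s ≤ c ∧ c ≤ cs.length
    · rw [if_pos h]
      simp [List.find?, h.1, h.2]
    · rw [if_neg h, pvLoopB.eq_def, dif_neg (by omega)]
      have : (decide (s ≤ c) && decide (c ≤ cs.length)) = false := by
        rcases Decidable.not_and_iff_not_or_not.mp h with h1 | h1 <;> simp [h1]
      simp [List.find?, this]

-- B's loop computes find? over the spans
lemma pvLoopB_eq_find (cs : List Char) (c : Nat) :
    ∀ k i st, cs.length - i ≤ k → i ≤ cs.length →
    pvLoopB (cs ++ [' ']) cs c i st =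
      match List.find? (fun p => p.1 ≤ c && c ≤ p.2) (pvSpansB cs i st) with
      | some p => String.ofList (PySem.List.slice cs (some (p.1 : Int)) (some (p.2 : Int)))
      | none => "" := by
  intro k
  induction k with
  | zero =>
    intro i st hk hi
    have : i = cs.length := by omega
    subst this
    exact pvLoopB_last cs c st
  | succ k ih =>
    intro i st hk hi
    by_cases hil : i < cs.length
    · have hchar : (cs ++ [' ']).getD i ' ' = cs.getD i ' ' := pvGetD_append_space cs i
      rw [pvLoopB.eq_def, dif_pos (by simp; omega), hchar]
      by_cases hw : pvIsWord (cs.getD i ' ') = true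
      · rw [if_pos hw, pvSpansB.eq_def, dif_pos hil, if_pos hw]
        exact ih (i + 1) (some (st.getD i)) (by omega) (by omega)
      · rw [if_neg hw, pvSpansB.eq_def, dif_pos hil, if_neg hw]
        cases st with
        | none => exact ih (i + 1) none (by omega) (by omega)
        | some s =>
          dsimp only
          by_cases h : s ≤ c ∧ c ≤ i
          · rw [if_pos h]
            simp [List.find?, h.1, h.2]
          · rw [if_neg h]
            have hpf : (decide (s ≤ c) && decide (c ≤ i)) = false := by
              rcases Decidable.not_and_iff_not_or_not.mp h with h1 | h1 <;> simp [h1]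
            rw [List.find?]
            rw [hpf]
            exact ih (i + 1) none (by omega) (by omega)
    · have : i = cs.length := by omega
      subst this
      exact pvLoopB_last cs c st

-- the main bridge: A's anchor-shift + outward growth equals B's single pass
lemma pvMain (cs : List Char) (c : Nat) (hc : c < cs.length) :
    (if ¬ pvIsWord (cs.getD c ' ') then
        if c > 0 ∧ pvIsWord (cs.getD (c - 1) ' ') then pvFinishA cs (c - 1) else ""
      else pvFinishA cs c) = pvLoopB (cs ++ [' ']) cs c 0 none := by
  rw [pvLoopB_eq_find cs c cs.length 0 none (by omega) (by omega)]
  have hsound := pvSpansB_sound cs cs.length 0 none (by omega) (by omega) (Or.inl rfl)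
  cases hfind : List.find? (fun p => p.1 ≤ c && c ≤ p.2) (pvSpansB cs 0 none) with
  | none =>
    -- no span touches c: A must return "" too
    have hnone := List.find?_eq_none.mp hfind
    by_cases hw : pvIsWord (cs.getD c ' ') = true
    · exfalso
      obtain ⟨p, hpm, hp1, hp2⟩ :=
        pvSpansB_cover cs c hc hw cs.length 0 none (by omega) (Or.inl rfl) (Or.inl (Nat.zero_le c))
      have := hnone p hpm
      simp [hp1, Nat.le_of_lt hp2] at this
    · rw [if_pos (by simpa using hw)]
      by_cases hsh : c > 0 ∧ pvIsWord (cs.getD (c - 1) ' ') = true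
      · exfalso
        obtain ⟨p, hpm, hp1, hp2⟩ :=
          pvSpansB_cover cs (c - 1) (by omega) hsh.2 cs.length 0 none (by omega) (Or.inl rfl)
            (Or.inl (Nat.zero_le _))
        have := hnone p hpm
        simp only [Bool.and_eq_true, decide_eq_true_eq, not_and] at this
        have h1 : p.1 ≤ c := by omega
        have h2 : c ≤ p.2 := by omega
        exact (this h1) h2
      · rw [if_neg hsh]
  | some pr =>
    obtain ⟨s, e⟩ := pr
    have hpred := List.find?_some hfind
    have hmem := List.mem_of_find?_eq_some hfind
    simp only [Bool.and_eq_true, decide_eq_true_eq] at hpred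
    obtain ⟨hsc, hce⟩ := hpred
    obtain ⟨g1, g2, g3, g4, g5⟩ := hsound (s, e) hmem
    simp only at g1 g2 g3 g4 g5 hsc hce
    by_cases hw : pvIsWord (cs.getD c ' ') = true
    · -- the found span strictly contains c
      have hce' : c < e := by
        rcases Nat.lt_or_ge c e with h | h
        · exact h
        · have : e = c := by omega
          subst this
          rcases g5 with h5 | h5
          · omega
          · rw [h5] at hw; exact absurd hw (by simp)
      rw [if_neg (by simpa using hw)]
      unfold pvFinishA
      rw [pvLeftA_spec cs s c hsc (fun j hj1 hj2 => g3 j hj1 (by omega)) g4,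
        pvRightA_spec cs e g2 g5 e (c + 1) (by omega) (by omega)
          (fun j hj1 hj2 => g3 j (by omega) hj2)]
      congr 1
      apply pvStrip_noop
      intro x hx
      rw [PySem.List.slice_natCast] at hx
      obtain ⟨kk, hkk, hxe⟩ := List.getElem_of_mem hx
      simp only [List.length_take, List.length_drop, lt_min_iff] at hkk
      have hsk : s + kk < cs.length := by omega
      have hxv : x = cs[s + kk] := by
        rw [← hxe]
        simp [List.getElem_take, List.getElem_drop]
      have hword : pvIsWord (cs.getD (s + kk) ' ') = true := g3 (s + kk) (by omega) (by omega)
      rw [List.getD_eq_getElem cs ' ' hsk] at hword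
      rw [hxv]
      exact pvWord_not_space _ hword
    · -- word(c) is false, so the found span ends exactly at c; A shifts to c - 1
      have he : e = c := by
        rcases Nat.lt_or_ge c e with h | h
        · exact absurd (g3 c hsc h) hw
        · omega
      subst he
      have hc0 : 0 < e := by omega
      have hwp : pvIsWord (cs.getD (e - 1) ' ') = true := g3 (e - 1) (by omega) (by omega)
      rw [if_pos (by simpa using hw), if_pos ⟨hc0, hwp⟩]
      unfold pvFinishA
      rw [pvLeftA_spec cs s (e - 1) (by omega) (fun j hj1 hj2 => g3 j hj1 (by omega)) g4]
      have : e - 1 + 1 = e := by omega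
      rw [this, pvRightA_spec cs e g2 g5 0 e (by omega) le_rfl (fun j hj1 hj2 => by omega)]
      congr 1
      apply pvStrip_noop
      intro x hx
      rw [PySem.List.slice_natCast] at hx
      obtain ⟨kk, hkk, hxe⟩ := List.getElem_of_mem hx
      simp only [List.length_take, List.length_drop, lt_min_iff] at hkk
      have hsk : s + kk < cs.length := by omega
      have hxv : x = cs[s + kk] := by
        rw [← hxe]
        simp [List.getElem_take, List.getElem_drop]
      have hword : pvIsWord (cs.getD (s + kk) ' ') = true := g3 (s + kk) (by omega) (by omega)
      rw [List.getD_eq_getElem cs ' ' hsk] at hword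
      rw [hxv]
      exact pvWord_not_space _ hword

-- common tail of the two ports after the line has been selected
lemma pvTail (column : Int) (text : String) :
    (if text == "" then "" else
      let cs := text.toList
      let n : Int := (cs.length : Int)
      let col0 : Int := max 0 (min column n)
      let col1 : Int := if col0 ≥ n ∧ col0 > 0 then col0 - 1 else col0
      if col1 < 0 ∨ col1 ≥ n then "" else
      let c := col1.toNat
      if ¬ pvIsWord (cs.getD c ' ') then
        if c > 0 ∧ pvIsWord (cs.getD (c - 1) ' ') then pvFinishA cs (c - 1) else ""
      else pvFinishA cs c) =
    (if text == "" then "" else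
      let cs := text.toList
      let c : Nat := (min (max column 0) ((cs.length : Int) - 1)).toNat
      pvLoopB (cs ++ [' ']) cs c 0 none) := by
  by_cases he : (text == "") = true
  · rw [if_pos he, if_pos he]
  · rw [if_neg he, if_neg he]
    dsimp only
    have hne : text ≠ "" := by simpa using he
    have hn : 1 ≤ text.toList.length := by
      rcases Nat.eq_zero_or_pos text.toList.length with h0 | h0
      · exact absurd (by simpa using List.length_eq_zero_iff.mp h0) hne
      · exact h0
    set cs := text.toList with hcs
    set n : Int := (cs.length : Int) with hnd
    have hcol : (if max 0 (min column n) ≥ n ∧ max 0 (min column n) > 0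
        then max 0 (min column n) - 1 else max 0 (min column n)) =
        min (max column 0) (n - 1) := by
      split_ifs with h <;> omega
    rw [hcol, if_neg (by omega)]
    exact pvMain cs _ (by omega)

-- ===== VERDICT =====
theorem symbol_at_source_position_py_spec : Claim_equal_symbol_at_source_position_py := by
  intro source_text line column _
  show symbol_at_source_position_py source_text line column = symbol_at_source_position_py_alt source_text line column
  rw [symbol_at_source_position_py, symbol_at_source_position_py_alt]
  exact if_congr Iff.rfl rfl (pvTail column _)
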